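-- pv_equiv track=rewrite | github.com/9ooDa/algo_prac | greedy/ecote_large_num.py | solution
-- ===== SOURCE A (Python) =====
-- def solution(m: int, k: int, arr: list):
--     arr.sort(reverse=True)
--     elem_num = 0
--     consec = 0
--     res = 0
--     while elem_num < m:
--         if consec < k:
--             res += arr[0]
--             consec += 1
--             elem_num += 1
--         else:
--             if arr[0] == arr[1]:
--                 consec = 0
--             else:
--                 res += arr[1]
--                 elem_num += 1
--                 consec = 0
--     return res
-- ===== SOURCE B (Python) =====
-- def solution(m: int, k: int, arr: list):
--     arr.sort(reverse=True)
--     if m <= 0: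
--         return 0
--     a = arr[0]
--     if m <= k:
--         return m * a
--     b = arr[1]
--     if a == b:
--         return m * a
--     q, r = divmod(m, k + 1)
--     return (q * k + r) * a + q * b
-- ===== Notes on version B (the rewrite author's own statement) =====
-- stated objective: simpler
-- what changed: A simulates the m picks one by one in a while loop; B sorts, takes the two largest values and computes the answer in closed form over (k+1)-sized blocks with one divmod (loop-free; the measured cost is dominated by sorting in both).
-- outside the precondition, e.g. on solution(1, -1, [7, 1, 3]): A returns 3, B raises ZeroDivisionError; on solution(2, 0, [3, 1]): A returns 2, B returns 2
import Mathlib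
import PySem

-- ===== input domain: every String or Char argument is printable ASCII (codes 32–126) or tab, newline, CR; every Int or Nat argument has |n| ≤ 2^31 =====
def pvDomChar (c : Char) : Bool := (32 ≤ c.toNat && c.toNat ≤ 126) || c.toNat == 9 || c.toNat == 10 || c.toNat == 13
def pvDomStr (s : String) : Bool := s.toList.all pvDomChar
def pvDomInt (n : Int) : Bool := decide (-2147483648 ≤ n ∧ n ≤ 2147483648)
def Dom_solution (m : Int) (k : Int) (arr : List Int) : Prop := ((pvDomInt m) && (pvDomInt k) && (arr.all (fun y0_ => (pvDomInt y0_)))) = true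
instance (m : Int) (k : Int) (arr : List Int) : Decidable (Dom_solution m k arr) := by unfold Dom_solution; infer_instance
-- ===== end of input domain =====

-- B replaces A's pick-by-pick while loop with closed-form arithmetic over (k+1)-sized
-- blocks after sorting (simpler: loop-free). Both Pythons sort `arr` in place (same side
-- effect); the theorems are about the return value.

-- ===== PORT A =====
-- A's while loop: state (elem_num, consec, res). The fuel argument is only a guard that
-- makes the recursion total; within Pre_solution the loop finishes within the given fuel
-- (each iteration either picks an element or resets consec, which k ≥ 1 makes progress).
def solutionLoop (m : Int) (k : Int) (a : Int) (b : Int) :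
    Nat → Int → Int → Int → Int
  | 0, _, _, res => res
  | fuel + 1, elemNum, consec, res =>
    if elemNum < m then
      if consec < k then
        solutionLoop m k a b fuel (elemNum + 1) (consec + 1) (res + a)
      else
        if a = b then
          solutionLoop m k a b fuel elemNum 0 res
        else
          solutionLoop m k a b fuel (elemNum + 1) 0 (res + b)
    else
      res

def solution (m : Int) (k : Int) (arr : List Int) : Int :=
  -- arr.sort(reverse=True); arr[0] / arr[1] are in range on Pre_solution (getD 0 is never
  -- the value actually used there)
  let s := PySem.List.sorted arr (fun x => x) true
  let a := (PySem.List.pyGet? s 0).getD 0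
  let b := (PySem.List.pyGet? s 1).getD 0
  solutionLoop m k a b (2 * m + 1).toNat 0 0 0

-- ===== PORT B =====
def solution_alt (m : Int) (k : Int) (arr : List Int) : Int :=
  let s := PySem.List.sorted arr (fun x => x) true
  if m ≤ 0 then 0
  else
    let a := (PySem.List.pyGet? s 0).getD 0   -- in range on Pre_solution
    if m ≤ k then m * a
    else
      let b := (PySem.List.pyGet? s 1).getD 0 -- in range on Pre_solution
      if a = b then m * a
      else
        match PySem.Int.divmod? m (k + 1) with  -- k + 1 ≠ 0 on Pre_solution (k ≥ 1)
        | some (q, r) => (q * k + r) * a + q * b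
        | none => 0

-- ===== PRECONDITION & SPEC =====
-- Pre_ excludes, for m > 0: empty arr and single-element arr with m > k (A raises
-- IndexError), and k ≤ 0 (a degenerate limit of "at most k consecutive picks" on which A
-- loops forever whenever the two largest elements are equal, and otherwise returns a
-- value B happens to match — see cites).
def Pre_solution (m : Int) (k : Int) (arr : List Int) : Prop :=
  m ≤ 0 ∨ (1 ≤ k ∧ ((m ≤ k ∧ 1 ≤ (arr.length : Int)) ∨ 2 ≤ (arr.length : Int)))
instance (m : Int) (k : Int) (arr : List Int) : Decidable (Pre_solution m k arr) := by
  unfold Pre_solution; infer_instance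

def pvWitness_solution : Int × Int × List Int := (5, 2, [4, 3, 3, 1])

def Spec_solution (m : Int) (k : Int) (arr : List Int) (out : Int) : Prop := out = solution_alt m k arr
instance (m : Int) (k : Int) (arr : List Int) (out : Int) : Decidable (Spec_solution m k arr out) := by unfold Spec_solution; infer_instance

-- ===== CLAIM (what is proved, stated in full; the proofs are below) =====
def Claim_equal_solution : Prop := ∀ (m : Int) (k : Int) (arr : List Int), Dom_solution m k arr → Pre_solution m k arr → Spec_solution m k arr (solution m k arr)

-- ===== LEMMAS AND PROOFS =====

-- Closed-form value of the remaining loop: t picks left, consec = c.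
def Gval (k : Int) (a : Int) (b : Int) (t : Int) (c : Int) : Int :=
  if a = b then t * a
  else (t - (t + c) / (k + 1)) * a + (t + c) / (k + 1) * b

theorem gval_small (k a b c : Int) (hc : 0 ≤ c) (hck : c ≤ k) :
    Gval k a b 0 c = 0 := by
  unfold Gval
  have h0 : c / (k + 1) = 0 := Int.ediv_eq_zero_of_lt hc (by omega)
  split_ifs <;> simp [h0]

theorem loop_eq_gval (m k a b : Int) (hk : 1 ≤ k) :
    ∀ (fuel : Nat) (elemNum consec res : Int), 0 ≤ consec → consec ≤ k →
      elemNum ≤ m →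
      2 * (m - elemNum) + (if consec < k then 0 else 1) ≤ (fuel : Int) →
      solutionLoop m k a b fuel elemNum consec res
        = res + Gval k a b (m - elemNum) consec := by
  intro fuel
  induction fuel with
  | zero =>
    intro elemNum consec res h0 hck hem hf
    have ht : m - elemNum = 0 := by split_ifs at hf <;> omega
    have hclt : consec < k := by by_contra h; split_ifs at hf <;> omega
    simp [solutionLoop, ht, gval_small k a b consec h0 hck]
  | succ n ih =>
    intro elemNum consec res h0 hck hem hf
    simp only [solutionLoop]
    by_cases hlt : elemNum < m
    · simp only [hlt, if_true]
      by_cases hcl : consec < k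
      · simp only [hcl, if_true]
        rw [ih (elemNum + 1) (consec + 1) (res + a) (by omega) (by omega) (by omega)
            (by push_cast at hf ⊢; split_ifs at hf ⊢ <;> omega)]
        have hidx : m - elemNum - 1 + (consec + 1) = m - elemNum + consec := by ring
        unfold Gval
        have : m - (elemNum + 1) = m - elemNum - 1 := by ring
        rw [this, hidx]
        split_ifs <;> ring
      · simp only [hcl, if_false]
        have hck' : consec = k := by omega
        by_cases hab : a = b
        · rw [if_pos hab]
          rw [ih elemNum 0 res (by omega) (by omega) (by omega)
              (by push_cast at hf ⊢; split_ifs at hf ⊢ <;> omega)]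
          unfold Gval
          simp [hab]
        · rw [if_neg hab]
          rw [ih (elemNum + 1) 0 (res + b) (by omega) (by omega) (by omega)
              (by push_cast at hf ⊢; split_ifs at hf ⊢ <;> omega)]
          unfold Gval
          rw [if_neg hab, if_neg hab]
          have h1 : m - elemNum + consec = (m - (elemNum + 1) + 0) + 1 * (k + 1) := by
            rw [hck']; ring
          have h2 : (m - elemNum + consec) / (k + 1)
              = (m - (elemNum + 1) + 0) / (k + 1) + 1 := by
            rw [h1, Int.add_mul_ediv_right _ _ (by omega : k + 1 ≠ 0)]
          rw [h2]; ring
    · simp only [hlt, if_false]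
      have ht : m - elemNum = 0 := by omega
      rw [ht, gval_small k a b consec h0 hck]; ring

-- divmod? for a nonzero divisor, in ediv form (divisor here is positive).
theorem divmod_pos (m d : Int) (hd : 0 < d) :
    PySem.Int.divmod? m d = some (m / d, m % d) := by
  have h1 : PySem.Int.floordiv m d = m / d := PySem.Int.floordiv_eq_ediv_of_pos hd
  have h2 : PySem.Int.mod m d = m % d := PySem.Int.mod_eq_emod_of_pos hd
  simp only [PySem.Int.floordiv] at h1
  simp only [PySem.Int.mod] at h2
  simp [PySem.Int.divmod?, h1, h2]
  omega

-- ===== VERDICT (by name: the statement is the Claim_ definition above) =====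
theorem solution_spec : Claim_equal_solution := by
  intro m k arr _ hpre
  unfold Spec_solution
  simp only [solution, solution_alt]
  generalize (PySem.List.sorted arr (fun x => x) true) = s at *
  generalize ha : ((PySem.List.pyGet? s 0).getD 0) = a
  generalize hb : ((PySem.List.pyGet? s 1).getD 0) = b
  by_cases hm : m ≤ 0
  · -- loop body never entered
    have hloop : ∀ fuel, solutionLoop m k a b fuel 0 0 0 = 0 := by
      intro fuel
      cases fuel with
      | zero => rfl
      | succ n =>
        simp only [solutionLoop]
        rw [if_neg (by omega : ¬ ((0 : Int) < m))]
    rw [hloop, if_pos hm]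
  · have hk : 1 ≤ k := by
      rcases hpre with h | ⟨hk, _⟩; · omega
      · exact hk
    have hfuel : 2 * (m - 0) + (if (0 : Int) < k then 0 else 1)
        ≤ (((2 * m + 1).toNat : Nat) : Int) := by
      rw [Int.toNat_of_nonneg (by omega)]
      split_ifs <;> omega
    rw [loop_eq_gval m k a b hk (2 * m + 1).toNat 0 0 0 le_rfl (by omega) (by omega) hfuel,
      if_neg hm]
    simp only [sub_zero, zero_add]
    unfold Gval
    by_cases hmk : m ≤ k
    · rw [if_pos hmk]
      have h0 : (m + 0) / (k + 1) = 0 := by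
        rw [add_zero]; exact Int.ediv_eq_zero_of_lt (by omega) (by omega)
      by_cases hab : a = b
      · rw [if_pos hab]
      · rw [if_neg hab, h0]; ring
    · rw [if_neg hmk]
      by_cases hab : a = b
      · rw [if_pos hab, if_pos hab]
      · rw [if_neg hab, if_neg hab, divmod_pos m (k + 1) (by omega)]
        have hqr : m / (k + 1) * k + m % (k + 1) = m - m / (k + 1) := by
          nlinarith [Int.ediv_add_emod m (k + 1)]
        simp only [add_zero]
        rw [hqr]
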